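-- pv_equiv track=rewrite | github.com/nermadie/CodeForces_Solutions | CodeforcesRound952Div4/prob04.py | solve
-- ===== SOURCE A (Python) =====
-- def solve(n, m, matrix):
--     max_line, pos_in_first_line = 0, 0
--     max_count = 0
--     check_first = True
--     for i in range(n):
--         count = 0
--         for j in range(m):
--             if matrix[i][j] == "#":
--                 count += 1
--                 if check_first:
--                     pos_in_first_line = j
--                     check_first = False
--         if count > max_count:
--             max_line = i
--             max_count = count
--     return str(max_line + 1) + " " + str(pos_in_first_line + 1)
-- ===== SOURCE B (Python) =====
-- def solve(n, m, matrix):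
--     # Sparse representation: list the coordinates of every '#' cell in reading
--     # order, then derive both answers from it: the column is the first cell's
--     # column; the best row is the first argmax of a per-row histogram dict.
--     cells = [(i, j) for i in range(n) for j in range(m) if matrix[i][j] == "#"]
--     col = cells[0][1] if cells else 0
--     cnt = {}
--     for i, _ in cells:
--         cnt[i] = cnt.get(i, 0) + 1
--     best = max(range(n), key=lambda i: cnt.get(i, 0)) if cells else 0
--     return str(best + 1) + " " + str(col + 1)
-- ===== Notes on version B (the rewrite author's own statement) =====
-- stated objective: alternative
-- what changed: Replaces A's fused nested index-loops with four interacting accumulators by a sparse-data pipeline: build the list of coordinates of all '#' cells once, take the column from its first element, build a per-row histogram dict over the cell rows, and pick the best row as the first argmax of that dict over range(n).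
import Mathlib
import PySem

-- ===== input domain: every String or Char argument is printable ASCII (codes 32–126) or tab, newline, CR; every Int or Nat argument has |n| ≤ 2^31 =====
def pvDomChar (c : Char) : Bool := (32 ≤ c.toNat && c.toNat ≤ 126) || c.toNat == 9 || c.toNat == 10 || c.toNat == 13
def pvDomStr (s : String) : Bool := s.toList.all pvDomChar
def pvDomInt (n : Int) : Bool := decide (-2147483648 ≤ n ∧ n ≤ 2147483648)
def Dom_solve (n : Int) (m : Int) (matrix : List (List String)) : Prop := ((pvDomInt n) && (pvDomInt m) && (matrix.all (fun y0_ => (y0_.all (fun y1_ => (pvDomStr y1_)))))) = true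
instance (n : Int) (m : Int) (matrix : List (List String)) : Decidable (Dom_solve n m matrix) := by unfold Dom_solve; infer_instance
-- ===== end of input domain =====

-- B replaces A's fused nested loops (four interacting accumulators) by a sparse pipeline:
-- list all '#' coordinates once, read the column off its head, and pick the best row as the
-- first argmax over a per-row histogram dict (objective: alternative).

-- ===== PORT A =====
def solve (n : Int) (m : Int) (matrix : List (List String)) : String :=
  let st := (PySem.List.pyRange 0 n 1).foldl
    (fun (st : Int × Int × Int × Bool) i =>
      let row := PySem.List.pyGetD matrix i []
      let inner := (PySem.List.pyRange 0 m 1).foldl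
        (fun (s : Int × Int × Bool) j =>
          if PySem.List.pyGetD row j "" = "#" then
            (s.1 + 1, if s.2.2 then j else s.2.1, if s.2.2 then false else s.2.2)
          else s)
        (0, st.2.1, st.2.2.2)
      if inner.1 > st.2.2.1 then (i, inner.2.1, inner.1, inner.2.2)
      else (st.1, inner.2.1, st.2.2.1, inner.2.2))
    (0, 0, 0, true)
  PySem.Int.toStr (st.1 + 1) ++ " " ++ PySem.Int.toStr (st.2.1 + 1)

-- ===== PORT B =====
def solve_alt (n : Int) (m : Int) (matrix : List (List String)) : String :=
  -- cells = [(i, j) for i in range(n) for j in range(m) if matrix[i][j] == "#"]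
  let cells := (PySem.List.pyRange 0 n 1).flatMap (fun i =>
    ((PySem.List.pyRange 0 m 1).filter (fun j =>
      PySem.List.pyGetD (PySem.List.pyGetD matrix i []) j "" == "#")).map (fun j => (i, j)))
  -- col = cells[0][1] if cells else 0
  let col : Int := match cells with | [] => 0 | c :: _ => c.2
  -- cnt = {}; for i, _ in cells: cnt[i] = cnt.get(i, 0) + 1
  let cnt : PySem.Dict Int Int :=
    cells.foldl (fun d c => d.insert c.1 (d.getD c.1 0 + 1)) PySem.Dict.empty
  -- best = max(range(n), key=lambda i: cnt.get(i, 0)) if cells else 0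
  let best : Int :=
    if cells = [] then 0
    else (PySem.List.max? (PySem.List.pyRange 0 n 1) (fun i => cnt.getD i 0)).getD 0
  PySem.Int.toStr (best + 1) ++ " " ++ PySem.Int.toStr (col + 1)

-- ===== PRECONDITION & SPEC =====
-- Pre_ is exactly A's domain: A indexes only inside 'matrix[i][j]' with 0 ≤ i < n, 0 ≤ j < m,
-- so it raises IndexError iff 0 < m and (n > len(matrix) with n > 0, or m > len(row) for a visited row).
def Pre_solve (n : Int) (m : Int) (matrix : List (List String)) : Prop :=
  0 < m → (0 < n → n ≤ (matrix.length : Int)) ∧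
    ∀ row ∈ matrix.take n.toNat, m ≤ (row.length : Int)
instance (n : Int) (m : Int) (matrix : List (List String)) : Decidable (Pre_solve n m matrix) := by
  unfold Pre_solve; infer_instance

def pvWitness_solve : Int × Int × List (List String) :=
  (2, 2, [[".", "#"], ["#", "#"]])

def Spec_solve (n : Int) (m : Int) (matrix : List (List String)) (out : String) : Prop := out = solve_alt n m matrix
instance (n : Int) (m : Int) (matrix : List (List String)) (out : String) : Decidable (Spec_solve n m matrix out) := by unfold Spec_solve; infer_instance

-- ===== CLAIM (what is proved, stated in full; the proofs are below) =====
def Claim_equal_solve : Prop := ∀ (n : Int) (m : Int) (matrix : List (List String)), Dom_solve n m matrix → Pre_solve n m matrix → Spec_solve n m matrix (solve n m matrix)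

-- ===== LEMMAS AND PROOFS =====

-- abbreviations for proof-side reasoning (not used by the ports)
def cntI (r : List String) : Int := ((PySem.List.count r "#" : Nat) : Int)
def idxI (r : List String) : Int := (((PySem.List.index? r "#").getD 0 : Nat) : Int)

-- first '#' column in reading order (canonical form shared by both sides)
def firstHashCol : List (List String) → Int
  | [] => 0
  | r :: rest => if "#" ∈ r then idxI r else firstHashCol rest

-- columns holding '#' in a row, as produced by B's filtered comprehension
def hcolsA (r : List String) (s : Int) : List Int :=
  ((PySem.List.enumerate r s).filter (fun q => q.2 == "#")).map Prod.fst

-- canonical form of B's cell list over the truncated grid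
def cellsOf (rows : List (List String)) (s : Int) : List (Int × Int) :=
  (PySem.List.enumerate rows s).flatMap (fun p => (hcolsA p.2 0).map (fun j => (p.1, j)))

-- A's inner loop body (on enumerated truncated rows) and outer loop body
def innerF (st : Int × Int × Bool) (p : Int × String) : Int × Int × Bool :=
  if p.2 = "#" then (st.1 + 1, if st.2.2 then p.1 else st.2.1, if st.2.2 then false else st.2.2)
  else st

def outerF (st : Int × Int × Int × Bool) (p : Int × List String) : Int × Int × Int × Bool :=
  let inner := (PySem.List.enumerate p.2 0).foldl innerF (0, st.2.1, st.2.2.2)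
  if inner.1 > st.2.2.1 then (p.1, inner.2.1, inner.1, inner.2.2)
  else (st.1, inner.2.1, st.2.2.1, inner.2.2)

-- the two independent components of A's outer loop
def bestF (st : Int × Int) (p : Int × Int) : Int × Int :=
  if p.2 > st.2 then (p.1, p.2) else st

def posF (st : Int × Bool) (r : List String) : Int × Bool :=
  (if st.2 ∧ "#" ∈ r then idxI r else st.1, st.2 && !decide ("#" ∈ r))

theorem inner_char (r : List String) : ∀ (s c pos : Int) (cf : Bool),
    (PySem.List.enumerate r s).foldl innerF (c, pos, cf) =
      (c + cntI r,
       if cf ∧ "#" ∈ r then s + idxI r else pos,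
       cf && !decide ("#" ∈ r)) := by
  induction r with
  | nil => intro s c pos cf; simp [PySem.List.enumerate_nil, cntI, PySem.List.count_eq]
  | cons x t ih =>
    intro s c pos cf
    rw [PySem.List.enumerate_cons, List.foldl_cons]
    by_cases hx : x = "#"
    · subst hx
      have h1 : innerF (c, pos, cf) (s, "#") = (c + 1, if cf then s else pos, false) := by
        simp only [innerF]; cases cf <;> simp
      rw [h1, ih]
      simp only [Prod.mk.injEq]
      refine ⟨?_, ?_, ?_⟩
      · simp [cntI, PySem.List.count_eq]; ring
      · cases cf <;> simp [idxI]
      · simp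
    · have h1 : innerF (c, pos, cf) (s, x) = (c, pos, cf) := by simp [innerF, hx]
      rw [h1, ih]
      have hmem : ("#" ∈ x :: t) ↔ ("#" ∈ t) := by simp [Ne.symm hx]
      simp only [Prod.mk.injEq]
      refine ⟨?_, ?_, ?_⟩
      · simp [cntI, PySem.List.count_eq, hx]
      · by_cases hht : "#" ∈ t
        · have hidx : idxI (x :: t) = idxI t + 1 := by
            rcases Option.isSome_iff_exists.1 ((PySem.List.index?_isSome_iff t "#").2 hht) with ⟨k, hk⟩
            simp only [idxI]
            rw [PySem.List.index?_cons_of_ne t hx, hk]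
            simp
          cases cf <;> (simp [hmem, hht, hidx]; try ring)
        · simp [hmem, hht]
      · simp [hmem]

theorem outer_split (rows : List (List String)) :
    ∀ (s ml pos mc : Int) (cf : Bool),
    (PySem.List.enumerate rows s).foldl outerF (ml, pos, mc, cf) =
      (((PySem.List.enumerate (rows.map cntI) s).foldl bestF (ml, mc)).1,
       (rows.foldl posF (pos, cf)).1,
       ((PySem.List.enumerate (rows.map cntI) s).foldl bestF (ml, mc)).2,
       (rows.foldl posF (pos, cf)).2) := by
  induction rows with
  | nil => intro s ml pos mc cf; simp [PySem.List.enumerate_nil]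
  | cons r t ih =>
    intro s ml pos mc cf
    rw [List.map_cons, PySem.List.enumerate_cons, PySem.List.enumerate_cons,
        List.foldl_cons, List.foldl_cons, List.foldl_cons]
    have h1 : outerF (ml, pos, mc, cf) (s, r) =
        (if cntI r > mc then s else ml,
         if cf ∧ "#" ∈ r then idxI r else pos,
         if cntI r > mc then cntI r else mc,
         cf && !decide ("#" ∈ r)) := by
      simp only [outerF, inner_char r 0]
      by_cases h : cntI r > mc <;> by_cases hcf : cf = true <;>
        by_cases hh : "#" ∈ r <;> simp [h, hcf, hh]
    have h2 : bestF (ml, mc) (s, cntI r) =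
        (if cntI r > mc then s else ml, if cntI r > mc then cntI r else mc) := by
      simp only [bestF]; by_cases h : cntI r > mc <;> simp [h]
    have h3 : posF (pos, cf) r =
        (if cf ∧ "#" ∈ r then idxI r else pos, cf && !decide ("#" ∈ r)) := by
      simp only [posF]
    rw [h1, h2, h3, ih]

theorem idx_shift (t : List Int) (c M : Int) (hne : c ≠ M) (hmem : M ∈ t) :
    (((PySem.List.index? (c :: t) M).getD 0 : Nat) : Int) =
      (((PySem.List.index? t M).getD 0 : Nat) : Int) + 1 := by
  rcases Option.isSome_iff_exists.1 ((PySem.List.index?_isSome_iff t M).2 hmem) with ⟨k, hk⟩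
  rw [PySem.List.index?_cons_of_ne t hne, hk]
  simp

theorem foldl_max_all_le (t : List Int) (c : Int) (h : ∀ x ∈ t, x ≤ c) : t.foldl max c = c := by
  rcases PySem.List.foldl_max_mem t c with h1 | h1
  · exact h1
  · exact le_antisymm (h _ h1) (PySem.List.le_foldl_max t c).1

theorem best_char (cs : List Int) : ∀ (s ml mc : Int),
    (PySem.List.enumerate cs s).foldl bestF (ml, mc) =
      if cs.all (fun c => decide (c ≤ mc)) then (ml, mc)
      else (s + (((PySem.List.index? cs (cs.foldl max mc)).getD 0 : Nat) : Int), cs.foldl max mc) := by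
  induction cs with
  | nil => intro s ml mc; simp [PySem.List.enumerate_nil]
  | cons c t ih =>
    intro s ml mc
    rw [PySem.List.enumerate_cons, List.foldl_cons]
    by_cases hc : c > mc
    · have h1 : bestF (ml, mc) (s, c) = (s, c) := by simp [bestF, hc]
      rw [h1, ih]
      have hall : ((c :: t).all (fun x => decide (x ≤ mc))) = false := by
        simp; intro h; omega
      rw [hall]
      have hfold : (c :: t).foldl max mc = t.foldl max c := by
        simp [List.foldl_cons, max_eq_right (le_of_lt hc)]
      by_cases ht : t.all (fun x => decide (x ≤ c))
      · simp only [if_pos ht]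
        have h2 : t.foldl max c = c := foldl_max_all_le t c
          (by intro x hx; have := List.all_eq_true.1 ht x hx; simpa using this)
        rw [hfold, h2, PySem.List.index?_cons_self]
        simp
      · simp only [if_neg ht, Bool.false_eq_true, if_false]
        have hgt : c < t.foldl max c := by
          simp at ht; rcases ht with ⟨x, hx1, hx2⟩
          exact lt_of_lt_of_le hx2 ((PySem.List.le_foldl_max t c).2 x hx1)
        have hmem : t.foldl max c ∈ t := by
          rcases PySem.List.foldl_max_mem t c with h | h
          · omega
          · exact h
        rw [hfold, idx_shift t c _ (by omega) hmem]
        simp only [Prod.mk.injEq]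
        refine ⟨by ring, trivial⟩
    · have h1 : bestF (ml, mc) (s, c) = (ml, mc) := by simp [bestF, hc]
      rw [h1, ih]
      have hfold : (c :: t).foldl max mc = t.foldl max mc := by
        simp [List.foldl_cons, max_eq_left (le_of_not_gt hc)]
      by_cases ht : t.all (fun x => decide (x ≤ mc))
      · have hall : ((c :: t).all (fun x => decide (x ≤ mc))) = true := by
          simp at ht ⊢; exact ⟨le_of_not_gt hc, ht⟩
        rw [if_pos ht, if_pos hall]
      · have hall : ((c :: t).all (fun x => decide (x ≤ mc))) = false := by
          simp at ht ⊢; rcases ht with ⟨x, hx1, hx2⟩; intro _; exact ⟨x, hx1, hx2⟩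
        rw [if_neg (by simp [ht]), if_neg (by simp [hall])]
        have hM : mc < t.foldl max mc := by
          simp at ht; rcases ht with ⟨x, hx1, hx2⟩
          exact lt_of_lt_of_le hx2 ((PySem.List.le_foldl_max t mc).2 x hx1)
        have hmem : t.foldl max mc ∈ t := by
          rcases PySem.List.foldl_max_mem t mc with h | h
          · omega
          · exact h
        rw [hfold, idx_shift t c _ (by omega) hmem]
        simp only [Prod.mk.injEq]
        refine ⟨by ring, trivial⟩

theorem pos_false (rows : List (List String)) : ∀ (pos : Int),
    rows.foldl posF (pos, false) = (pos, false) := by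
  induction rows with
  | nil => intro pos; simp
  | cons r t ih => intro pos; rw [List.foldl_cons]; simp [posF, ih]

theorem pos_true (rows : List (List String)) : ∀ (pos : Int),
    rows.foldl posF (pos, true) =
      (if rows.any (fun r => decide ("#" ∈ r)) then firstHashCol rows else pos,
       !rows.any (fun r => decide ("#" ∈ r))) := by
  induction rows with
  | nil => intro pos; simp
  | cons r t ih =>
    intro pos
    rw [List.foldl_cons]
    by_cases hh : "#" ∈ r
    · have h1 : posF (pos, true) r = (idxI r, false) := by simp [posF, hh]
      rw [h1, pos_false]
      simp [hh, firstHashCol, idxI]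
    · have h1 : posF (pos, true) r = (pos, true) := by simp [posF, hh]
      rw [h1, ih]
      simp [hh, firstHashCol]

theorem firstHashCol_none (rows : List (List String))
    (h : rows.any (fun r => decide ("#" ∈ r)) = false) : firstHashCol rows = 0 := by
  induction rows with
  | nil => rfl
  | cons r t ih =>
    simp at h
    simp [firstHashCol, h.1, ih (by simp; exact h.2)]

-- conversion of A's inner index loop to a fold over the enumerated truncated row
theorem inner_conv (r0 : List String) (m : Int) (hml : 0 < m → m ≤ (r0.length : Int))
    (init : Int × Int × Bool) :
    (PySem.List.pyRange 0 m 1).foldl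
      (fun (s : Int × Int × Bool) j =>
        if PySem.List.pyGetD r0 j "" = "#" then
          (s.1 + 1, if s.2.2 then j else s.2.1, if s.2.2 then false else s.2.2)
        else s) init
    = (PySem.List.enumerate (r0.take m.toNat) 0).foldl innerF init := by
  by_cases hm : 0 < m
  case neg =>
    rw [show PySem.List.pyRange 0 m 1 = [] from PySem.List.pyRange_one_eq_nil (by omega),
        show m.toNat = 0 by omega]
    simp [PySem.List.enumerate_nil]
  have hml := hml hm
  have hlen : ((r0.take m.toNat).length : Int) = m := by
    simp [List.length_take]; omega
  conv_rhs => rw [PySem.List.enumerate_eq_map_pyRange (r0.take m.toNat) "", List.foldl_map]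
  rw [PySem.List.len_eq, hlen]
  apply PySem.List.foldl_congr_mem
  intro st j hj
  rcases PySem.List.mem_pyRange_one.1 hj with ⟨hj0, hjm⟩
  have hget : PySem.List.pyGetD (r0.take m.toNat) j "" = PySem.List.pyGetD r0 j "" := by
    rw [PySem.List.pyGetD_eq_getElem _ _ hj0 (by rw [hlen]; omega),
        PySem.List.pyGetD_eq_getElem r0 _ hj0 (by omega)]
    exact List.getElem_take
  rw [hget]
  rfl

-- conversion of A's outer index loop to a fold over the enumerated truncated grid
theorem A_as_enum (n m : Int) (matrix : List (List String))
    (hnl : 0 < n → n ≤ (matrix.length : Int))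
    (hrowlen : ∀ row ∈ matrix.take n.toNat, 0 < m → m ≤ (row.length : Int)) :
    (PySem.List.pyRange 0 n 1).foldl
      (fun (st : Int × Int × Int × Bool) i =>
        let row := PySem.List.pyGetD matrix i []
        let inner := (PySem.List.pyRange 0 m 1).foldl
          (fun (s : Int × Int × Bool) j =>
            if PySem.List.pyGetD row j "" = "#" then
              (s.1 + 1, if s.2.2 then j else s.2.1, if s.2.2 then false else s.2.2)
            else s)
          (0, st.2.1, st.2.2.2)
        if inner.1 > st.2.2.1 then (i, inner.2.1, inner.1, inner.2.2)
        else (st.1, inner.2.1, st.2.2.1, inner.2.2))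
      (0, 0, 0, true)
    = (PySem.List.enumerate ((matrix.take n.toNat).map (fun r => r.take m.toNat)) 0).foldl
        outerF (0, 0, 0, true) := by
  by_cases hn : 0 < n
  case neg =>
    rw [show PySem.List.pyRange 0 n 1 = [] from PySem.List.pyRange_one_eq_nil (by omega),
        show n.toNat = 0 by omega]
    simp [PySem.List.enumerate_nil]
  have hnl := hnl hn
  have hlen0 : ((matrix.take n.toNat).length : Int) = n := by
    simp [List.length_take]; omega
  have hlen : (((matrix.take n.toNat).map (fun r => r.take m.toNat)).length : Int) = n := by
    simpa using hlen0
  conv_rhs => rw [PySem.List.enumerate_eq_map_pyRange _ [], List.foldl_map]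
  rw [PySem.List.len_eq, hlen]
  apply PySem.List.foldl_congr_mem
  intro st j hj
  rcases PySem.List.mem_pyRange_one.1 hj with ⟨hj0, hjn⟩
  have hjt0 : j.toNat < (matrix.take n.toNat).length := by
    have := hlen0; omega
  have hrow_eq : PySem.List.pyGetD matrix j [] = (matrix.take n.toNat)[j.toNat] := by
    rw [PySem.List.pyGetD_eq_getElem matrix [] hj0 (by omega)]
    exact List.getElem_take.symm
  have hrows_eq : PySem.List.pyGetD ((matrix.take n.toNat).map (fun r => r.take m.toNat)) j []
      = (matrix.take n.toNat)[j.toNat].take m.toNat := by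
    rw [PySem.List.pyGetD_eq_getElem _ [] hj0 (by rw [hlen]; omega)]
    simp
  have hml : 0 < m → m ≤ (((matrix.take n.toNat)[j.toNat]).length : Int) :=
    hrowlen _ (List.getElem_mem _)
  simp only [hrow_eq, hrows_eq, outerF]
  rw [inner_conv _ m hml]

-- an outer-loop body that rewrites the state to itself leaves the fold at its initial value
theorem foldl_keep (l : List Int) : ∀ (init : Int × Int × Int × Bool), 0 ≤ init.2.2.1 →
    l.foldl (fun (st : Int × Int × Int × Bool) i =>
      if (0 : Int) > st.2.2.1 then (i, st.2.1, (0 : Int), st.2.2.2)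
      else (st.1, st.2.1, st.2.2.1, st.2.2.2)) init = init := by
  induction l with
  | nil => intro init _; rfl
  | cons x t ih =>
    intro init h0
    rw [List.foldl_cons, if_neg (by omega : ¬ ((0 : Int) > init.2.2.1))]
    exact ih init h0

-- ============== B-side lemmas (sparse cell list) ==============

theorem hcolsA_nil (r : List String) : ∀ (s : Int), ("#" ∉ r) → hcolsA r s = [] := by
  induction r with
  | nil => intro s _; rfl
  | cons x t ih =>
    intro s h
    have hx : (x == "#") = false := by
      simp at h ⊢; exact fun hc => h.1 (by simp [hc])
    simp only [hcolsA, PySem.List.enumerate_cons, List.filter_cons] at *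
    simp only [hx, Bool.false_eq_true, if_false]
    exact ih (s + 1) (by simp at h ⊢; exact h.2)

theorem hcolsA_head (r : List String) : ∀ (s : Int), "#" ∈ r →
    ∃ rest, hcolsA r s = (s + idxI r) :: rest := by
  induction r with
  | nil => intro s h; simp at h
  | cons x t ih =>
    intro s h
    by_cases hx : x = "#"
    · subst hx
      refine ⟨(hcolsA t (s + 1)), ?_⟩
      simp [hcolsA, PySem.List.enumerate_cons, idxI]
    · have ht : "#" ∈ t := by rcases List.mem_cons.1 h with h' | h'; exact absurd h'.symm hx; exact h'
      rcases ih (s + 1) ht with ⟨rest, hrest⟩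
      refine ⟨rest, ?_⟩
      have hidx : idxI (x :: t) = idxI t + 1 := by
        rcases Option.isSome_iff_exists.1 ((PySem.List.index?_isSome_iff t "#").2 ht) with ⟨k, hk⟩
        simp only [idxI]
        rw [PySem.List.index?_cons_of_ne t hx, hk]
        simp
      have hxb : (x == "#") = false := by simp [hx]
      simp only [hcolsA, PySem.List.enumerate_cons, List.filter_cons, hxb,
        Bool.false_eq_true, if_false] at hrest ⊢
      rw [hrest, hidx]
      congr 1
      ring

theorem hcolsA_length (r : List String) : ∀ (s : Int),
    ((hcolsA r s).length : Int) = cntI r := by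
  induction r with
  | nil => intro s; simp [hcolsA, cntI, PySem.List.count_eq]
  | cons x t ih =>
    intro s
    by_cases hx : x = "#"
    · subst hx
      have := ih (s + 1)
      simp only [hcolsA, PySem.List.enumerate_cons, cntI, PySem.List.count_eq,
        List.length_map] at this ⊢
      simp
      omega
    · have hxb : (x == "#") = false := by simp [hx]
      simp only [hcolsA, PySem.List.enumerate_cons, List.filter_cons, hxb,
        Bool.false_eq_true, if_false] at *
      rw [ih (s + 1)]
      simp [cntI, PySem.List.count_eq, hx]

theorem cellsOf_col (rows : List (List String)) : ∀ (s : Int),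
    (match cellsOf rows s with | [] => (0 : Int) | c :: _ => c.2) = firstHashCol rows := by
  induction rows with
  | nil => intro s; simp [cellsOf, PySem.List.enumerate_nil, firstHashCol]
  | cons r t ih =>
    intro s
    by_cases hh : "#" ∈ r
    · rcases hcolsA_head r 0 hh with ⟨rest, hrest⟩
      simp only [cellsOf, PySem.List.enumerate_cons, List.flatMap_cons, hrest]
      simp [firstHashCol, hh]
    · rw [show cellsOf (r :: t) s = cellsOf t (s + 1) by
        simp [cellsOf, PySem.List.enumerate_cons, hcolsA_nil r 0 hh]]
      rw [ih (s + 1)]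
      simp [firstHashCol, hh]

theorem cellsOf_nil_hash (rows : List (List String)) (s : Int)
    (h : cellsOf rows s = []) : ∀ r ∈ rows, "#" ∉ r := by
  intro r hr hhash
  rcases List.getElem_of_mem hr with ⟨k, hk, hrk⟩
  have hmem : ((s + (k : Int), r) : Int × List String) ∈ PySem.List.enumerate rows s := by
    rw [PySem.List.mem_enumerate_iff]
    exact ⟨k, hk, by rw [hrk]⟩
  have := (List.flatMap_eq_nil_iff.1 h) _ hmem
  rcases hcolsA_head r 0 hhash with ⟨rest, hrest⟩
  simp [hrest] at this

theorem count_map_pair (l : List Int) (a : Int) :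
    (l.map (fun j => ((a, j) : Int × Int))).map Prod.fst = List.replicate l.length a := by
  rw [List.map_map]
  exact List.map_const'  

theorem countFst_lt (rows : List (List String)) : ∀ (s i : Int), i < s →
    ((cellsOf rows s).map Prod.fst).count i = 0 := by
  induction rows with
  | nil => intro s i _; simp [cellsOf, PySem.List.enumerate_nil]
  | cons r t ih =>
    intro s i hlt
    simp only [cellsOf, PySem.List.enumerate_cons, List.flatMap_cons, List.map_append,
      List.count_append]
    rw [count_map_pair _ s, List.count_replicate]
    have hne : (s == i) = false := by simp; omega
    rw [hne]
    simpa [cellsOf] using ih (s + 1) i (by omega)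

theorem countFst_at (rows : List (List String)) : ∀ (s : Int) (k : Nat) (hk : k < rows.length),
    ((((cellsOf rows s).map Prod.fst).count (s + (k : Int)) : Nat) : Int) = cntI rows[k] := by
  induction rows with
  | nil => intro s k hk; simp at hk
  | cons r t ih =>
    intro s k hk
    simp only [cellsOf, PySem.List.enumerate_cons, List.flatMap_cons, List.map_append,
      List.count_append]
    rw [count_map_pair _ s, List.count_replicate]
    cases k with
    | zero =>
      have he : (s == s + ((0 : Nat) : Int)) = true := by simp
      rw [he, if_pos rfl]
      have h0 : ((cellsOf t (s + 1)).map Prod.fst).count (s + ((0 : Nat) : Int)) = 0 := by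
        simpa [cellsOf] using countFst_lt t (s + 1) (s + ((0 : Nat) : Int)) (by simp)
      simp only [cellsOf] at h0 ⊢
      rw [h0]
      push_cast
      rw [show ((hcolsA r 0).length : Int) + 0 = ((hcolsA r 0).length : Int) by ring,
          hcolsA_length r 0]
      simp
    | succ k' =>
      have hne : (s == s + ((k' + 1 : Nat) : Int)) = false := by simp; omega
      rw [hne, if_neg (by simp)]
      have harith : s + ((k' + 1 : Nat) : Int) = (s + 1) + (k' : Int) := by push_cast; ring
      rw [harith]
      have := ih (s + 1) k' (by simpa using hk)
      simpa [cellsOf] using this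

-- the step of the foldl inside Python's max(·, key=·)
def mstep (key : Int → Int) (acc : Option Int) (x : Int) : Option Int :=
  match acc with
  | none => some x
  | some m => if key m < key x then some x else some m

-- the foldl inside Python's max(·, key=·) tracks the first argmax, as bestF does
theorem max_fold_char (cs : List Int) : ∀ (s p v : Int) (key : Int → Int),
    (∀ q ∈ PySem.List.enumerate cs s, key q.1 = q.2) → key p = v →
    ((PySem.List.enumerate cs s).map Prod.fst).foldl (mstep key) (some p)
    = some ((PySem.List.enumerate cs s).foldl bestF (p, v)).1 := by
  induction cs with
  | nil => intro s p v key _ _; simp [PySem.List.enumerate_nil]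
  | cons c t ih =>
    intro s p v key hkey hpv
    rw [PySem.List.enumerate_cons, List.map_cons, List.foldl_cons, List.foldl_cons]
    have hks : key s = c := hkey (s, c) (by rw [PySem.List.enumerate_cons]; exact List.mem_cons_self)
    have htail : ∀ q ∈ PySem.List.enumerate t (s + 1), key q.1 = q.2 := by
      intro q hq
      exact hkey q (by rw [PySem.List.enumerate_cons]; exact List.mem_cons_of_mem _ hq)
    by_cases hc : v < c
    · have h1 : mstep key (some p) ((s, c) : Int × Int).1 = some s := by
        simp only [mstep]
        rw [if_pos (by rw [hks, hpv]; exact hc)]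
      have h2 : bestF (p, v) (s, c) = (s, c) := by simp [bestF]; omega
      rw [h1, h2]
      exact ih (s + 1) s c key htail hks
    · have h1 : mstep key (some p) ((s, c) : Int × Int).1 = some p := by
        simp only [mstep]
        rw [if_neg (by rw [hks, hpv]; omega)]
      have h2 : bestF (p, v) (s, c) = (p, v) := by simp [bestF]; omega
      rw [h1, h2]
      exact ih (s + 1) p v key htail hpv

-- A's running-max result coincides with B's first-argmax form, for nonnegative counts
theorem best_final (c : Int) (t : List Int) (hc : 0 ≤ c) :
    (if (c :: t).all (fun x => decide (x ≤ 0)) then (0 : Int)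
      else 0 + (((PySem.List.index? (c :: t) ((c :: t).foldl max 0)).getD 0 : Nat) : Int))
    = (if t.all (fun x => decide (x ≤ c)) then (0 : Int)
      else 1 + (((PySem.List.index? t (t.foldl max c)).getD 0 : Nat) : Int)) := by
  have hfold : (c :: t).foldl max 0 = t.foldl max c := by
    simp [List.foldl_cons, max_eq_right hc]
  by_cases ht : t.all (fun x => decide (x ≤ c))
  · rw [if_pos ht]
    by_cases hall : (c :: t).all (fun x => decide (x ≤ 0))
    · rw [if_pos hall]
    · rw [if_neg hall]
      have hM : t.foldl max c = c := foldl_max_all_le t c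
        (by intro x hx; have := List.all_eq_true.1 ht x hx; simpa using this)
      rw [hfold, hM, PySem.List.index?_cons_self]
      simp
  · have hgt : c < t.foldl max c := by
      simp at ht; rcases ht with ⟨x, hx1, hx2⟩
      exact lt_of_lt_of_le hx2 ((PySem.List.le_foldl_max t c).2 x hx1)
    have hmem : t.foldl max c ∈ t := by
      rcases PySem.List.foldl_max_mem t c with h | h
      · omega
      · exact h
    have hall : ((c :: t).all (fun x => decide (x ≤ 0))) = false := by
      rw [Bool.eq_false_iff]
      intro hcon
      have := List.all_eq_true.1 hcon _ (List.mem_cons_of_mem c hmem)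
      simp at this
      omega
    rw [if_neg (by simp [hall]), if_neg (by simpa using ht), hfold,
        idx_shift t c _ (by omega) hmem]
    ring

-- B's dict-building loop is Counter(cells row components)
theorem cnt_counter (cells : List (Int × Int)) :
    cells.foldl (fun (d : PySem.Dict Int Int) c => d.insert c.1 (d.getD c.1 0 + 1))
      PySem.Dict.empty
    = PySem.Dict.counter (cells.map Prod.fst) := by
  rw [← PySem.Dict.foldl_insert_getD_add_one_eq_counter, List.foldl_map]

-- B's filtered range for one row equals the canonical '#'-column list of the truncated row
theorem hcols_conv (r : List String) (m : Int) (hm : 0 < m) (hml : m ≤ (r.length : Int)) :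
    hcolsA (r.take m.toNat) 0
    = (PySem.List.pyRange 0 m 1).filter (fun j => PySem.List.pyGetD r j "" == "#") := by
  have hlen : (((r.take m.toNat).length : Nat) : Int) = m := by
    simp [List.length_take]; omega
  unfold hcolsA
  rw [PySem.List.enumerate_eq_map_pyRange (r.take m.toNat) "", PySem.List.len_eq, hlen,
      List.filter_map, List.map_map]
  have hid : (Prod.fst ∘ fun j => ((j, PySem.List.pyGetD (r.take m.toNat) j "") : Int × String))
      = id := rfl
  rw [hid, List.map_id]
  apply List.filter_congr
  intro j hj
  rcases PySem.List.mem_pyRange_one.1 hj with ⟨hj0, hjm⟩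
  simp only [Function.comp]
  have hget : PySem.List.pyGetD (r.take m.toNat) j "" = PySem.List.pyGetD r j "" := by
    rw [PySem.List.pyGetD_eq_getElem _ _ hj0 (by rw [hlen]; omega),
        PySem.List.pyGetD_eq_getElem r _ hj0 (by omega)]
    exact List.getElem_take
  rw [hget]

-- B's cell comprehension equals the canonical cell list over the truncated grid
theorem cells_conv (n m : Int) (matrix : List (List String)) (hm : 0 < m)
    (hnl : 0 < n → n ≤ (matrix.length : Int))
    (hrowlen : ∀ row ∈ matrix.take n.toNat, m ≤ (row.length : Int)) :
    (PySem.List.pyRange 0 n 1).flatMap (fun i =>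
      ((PySem.List.pyRange 0 m 1).filter (fun j =>
        PySem.List.pyGetD (PySem.List.pyGetD matrix i []) j "" == "#")).map (fun j => (i, j)))
    = cellsOf ((matrix.take n.toNat).map (fun r => r.take m.toNat)) 0 := by
  by_cases hn : 0 < n
  case neg =>
    rw [show PySem.List.pyRange 0 n 1 = [] from PySem.List.pyRange_one_eq_nil (by omega),
        show n.toNat = 0 by omega]
    simp [cellsOf, PySem.List.enumerate_nil]
  have hnl := hnl hn
  have hlen0 : ((matrix.take n.toNat).length : Int) = n := by
    simp [List.length_take]; omega
  have hlen : (((matrix.take n.toNat).map (fun r => r.take m.toNat)).length : Int) = n := by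
    simpa using hlen0
  unfold cellsOf
  conv_rhs => rw [PySem.List.enumerate_eq_map_pyRange _ [], List.flatMap_map]
  rw [PySem.List.len_eq, hlen]
  apply List.flatMap_congr
  intro i hi
  rcases PySem.List.mem_pyRange_one.1 hi with ⟨hi0, hin⟩
  have hit : i.toNat < (matrix.take n.toNat).length := by omega
  have hrow_eq : PySem.List.pyGetD matrix i [] = (matrix.take n.toNat)[i.toNat] := by
    rw [PySem.List.pyGetD_eq_getElem matrix [] hi0 (by omega)]
    exact List.getElem_take.symm
  have hrows_eq : PySem.List.pyGetD ((matrix.take n.toNat).map (fun r => r.take m.toNat)) i []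
      = (matrix.take n.toNat)[i.toNat].take m.toNat := by
    rw [PySem.List.pyGetD_eq_getElem _ [] hi0 (by rw [hlen]; omega)]
    simp
  have hml : m ≤ (((matrix.take n.toNat)[i.toNat]).length : Int) :=
    hrowlen _ (List.getElem_mem _)
  simp only [hrow_eq, hrows_eq]
  congr 1
  exact (hcols_conv _ m hm hml).symm

-- ===== VERDICT (by name: the statement is the Claim_ definition above) =====
theorem solve_spec : Claim_equal_solve := by
  intro n m matrix _ hpre
  unfold Spec_solve solve solve_alt
  dsimp only []
  by_cases hm : 0 < m
  case neg =>
    -- m ≤ 0: A's inner loop is empty and its outer loop keeps its state; B has no cells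
    rw [show PySem.List.pyRange 0 m 1 = [] from PySem.List.pyRange_one_eq_nil (by omega)]
    simp only [List.foldl_nil, List.filter_nil, List.map_nil]
    rw [foldl_keep _ _ (by norm_num)]
    rw [show (PySem.List.pyRange 0 n 1).flatMap (fun _ => ([] : List (Int × Int))) = []
        from by simp]
    simp
  obtain ⟨hnl, hrowlen⟩ := hpre hm
  rw [A_as_enum n m matrix hnl (fun row hr _ => hrowlen row hr)]
  rw [cells_conv n m matrix hm hnl hrowlen]
  set rows := (matrix.take n.toNat).map (fun r => r.take m.toNat) with hrowsdef
  rw [outer_split, best_char, pos_true, cellsOf_col rows 0, cnt_counter (cellsOf rows 0)]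
  set cs := List.map cntI rows with hcsdef
  simp only [apply_ite (Prod.fst : Int × Int → Int)]
  have hApos : (if rows.any (fun r => decide ("#" ∈ r)) then firstHashCol rows else 0)
      = firstHashCol rows := by
    by_cases h : rows.any (fun r => decide ("#" ∈ r))
    · rw [if_pos h]
    · rw [if_neg h, firstHashCol_none rows (by simpa using h)]
  rw [hApos]
  by_cases hcell : cellsOf rows 0 = []
  · -- no '#' anywhere: both sides answer row 0
    rw [if_pos hcell]
    have hall : cs.all (fun c => decide (c ≤ 0)) = true := by
      simp only [hcsdef, List.all_eq_true, List.mem_map]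
      rintro c ⟨r, hr, rfl⟩
      have : "#" ∉ r := cellsOf_nil_hash rows 0 hcell r hr
      simp [cntI, PySem.List.count_eq, List.count_eq_zero_of_not_mem this]
    rw [if_pos hall]
  · rw [if_neg hcell]
    have hrne : rows ≠ [] := by
      intro h
      rw [h] at hcell
      exact hcell (by simp [cellsOf, PySem.List.enumerate_nil])
    have hn : 0 < n := by
      by_contra h
      have : rows = [] := by
        rw [hrowsdef, show n.toNat = 0 by omega]
        simp
      exact hrne this
    have hlenrows : ((rows.length : Nat) : Int) = n := by
      rw [hrowsdef]
      simp [List.length_take]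
      omega
    have hkey : ∀ q ∈ PySem.List.enumerate cs 0,
        (PySem.Dict.counter ((cellsOf rows 0).map Prod.fst)).getD q.1 0 = q.2 := by
      intro q hq
      rcases (PySem.List.mem_enumerate_iff cs 0 q).1 hq with ⟨k, hk, rfl⟩
      have hklt : k < rows.length := by
        simpa [hcsdef] using hk
      rw [PySem.Dict.getD_counter]
      have := countFst_at rows 0 k hklt
      simp only [zero_add] at this ⊢
      rw [this]
      simp [hcsdef]
    cases hcs : cs with
    | nil =>
      exact absurd (by simpa [hcsdef] using congrArg List.length hcs) (by simpa using hrne)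
    | cons c t =>
      have hpr : PySem.List.pyRange 0 n 1 = (PySem.List.enumerate cs 0).map Prod.fst := by
        rw [PySem.List.map_fst_enumerate cs 0]
        congr 1
        rw [show ((0 : Int) + (cs.length : Int)) = ((cs.length : Nat) : Int) by ring]
        rw [show ((cs.length : Nat) : Int) = n by rw [hcsdef]; simpa using hlenrows]
      rw [hcs] at hkey hpr
      have hkey0 : (PySem.Dict.counter ((cellsOf rows 0).map Prod.fst)).getD 0 0 = c :=
        hkey (0, c) (by rw [PySem.List.enumerate_cons]; exact List.mem_cons_self)
      have hkeyt : ∀ q ∈ PySem.List.enumerate t 1,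
          (PySem.Dict.counter ((cellsOf rows 0).map Prod.fst)).getD q.1 0 = q.2 := by
        intro q hq
        exact hkey q (by rw [PySem.List.enumerate_cons]; exact List.mem_cons_of_mem _ hq)
      rw [show PySem.List.max? (PySem.List.pyRange 0 n 1)
            (fun i => (PySem.Dict.counter ((cellsOf rows 0).map Prod.fst)).getD i 0)
          = (PySem.List.pyRange 0 n 1).foldl
            (mstep (fun i => (PySem.Dict.counter ((cellsOf rows 0).map Prod.fst)).getD i 0))
            none from by
              simp only [PySem.List.max?]
              congr 1
              funext acc x
              cases acc <;> rfl, hpr,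
          PySem.List.enumerate_cons, List.map_cons]
      rw [show ((0 : Int) + 1) = 1 from by norm_num]
      rw [show List.foldl
            (mstep (fun i => (PySem.Dict.counter ((cellsOf rows 0).map Prod.fst)).getD i 0))
            none ((((0 : Int), c) : Int × Int).1 :: (PySem.List.enumerate t 1).map Prod.fst)
          = List.foldl
            (mstep (fun i => (PySem.Dict.counter ((cellsOf rows 0).map Prod.fst)).getD i 0))
            (some (0 : Int)) ((PySem.List.enumerate t 1).map Prod.fst) from rfl]
      rw [max_fold_char t 1 0 c
            (fun i => (PySem.Dict.counter ((cellsOf rows 0).map Prod.fst)).getD i 0)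
            hkeyt hkey0,
          best_char t 1 0 c]
      simp only [apply_ite (Prod.fst : Int × Int → Int), Option.getD_some]
      have hc0 : 0 ≤ c := by
        have : c ∈ cs := by rw [hcs]; exact List.mem_cons_self
        rcases List.mem_map.1 (by rwa [hcsdef] at this) with ⟨r, _, rfl⟩
        simp [cntI]
      rw [best_final c t hc0]
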